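-- pv_equiv track=rewrite | github.com/waseemriyazz/training | Mar 6/2.py | minimal_max_time
-- ===== SOURCE A (Python) =====
-- def is_possible(chapters, n, m, max_time):
--     days = 1
--     time_required = 0
--
--     for i in range(m):
--         if time_required + chapters[i] <= max_time:
--             time_required += chapters[i]
--         else:
--             days += 1
--             time_required = chapters[i]
--             if days > n:
--                 return False
--
--     return True
--
-- def minimal_max_time(chapters, n, m):
--     left = max(chapters)
--     right = sum(chapters)
--
--     while left < right:
--         mid = (left + right) // 2
--
--         if is_possible(chapters, n, m, mid):
--             right = mid
--         else:
--             left = mid + 1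
--
--     return left
-- ===== SOURCE B (Python) =====
-- def minimal_max_time(chapters, n, m):
--     work = chapters[:max(0, m)]
--
--     def days(t):
--         d, run = 1, 0
--         for c in work:
--             run += c
--             if run > t:
--                 d, run = d + 1, c
--         return d
--
--     def solve(lo, hi):
--         if lo >= hi:
--             return lo
--         mid = (lo + hi) // 2
--         return solve(lo, mid) if days(mid) <= n else solve(mid + 1, hi)
--
--     return solve(max(chapters), sum(chapters))
-- ===== Notes on version B (the rewrite author's own statement) =====
-- stated objective: alternative
-- what changed: The index-driven feasibility loop with its two early-return exits is replaced by a total day-counting fold over the sliced chapter prefix compared against n once, and the imperative while-loop bisection by a recursive solve(lo, hi); same search, different decomposition and traversal of the state.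
-- outside the precondition, e.g. on minimal_max_time([3, 4], 0, 1): A returns 4, B returns 7; on minimal_max_time([5, 1], 1, 3): A returns 6, B returns 6
import Mathlib
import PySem

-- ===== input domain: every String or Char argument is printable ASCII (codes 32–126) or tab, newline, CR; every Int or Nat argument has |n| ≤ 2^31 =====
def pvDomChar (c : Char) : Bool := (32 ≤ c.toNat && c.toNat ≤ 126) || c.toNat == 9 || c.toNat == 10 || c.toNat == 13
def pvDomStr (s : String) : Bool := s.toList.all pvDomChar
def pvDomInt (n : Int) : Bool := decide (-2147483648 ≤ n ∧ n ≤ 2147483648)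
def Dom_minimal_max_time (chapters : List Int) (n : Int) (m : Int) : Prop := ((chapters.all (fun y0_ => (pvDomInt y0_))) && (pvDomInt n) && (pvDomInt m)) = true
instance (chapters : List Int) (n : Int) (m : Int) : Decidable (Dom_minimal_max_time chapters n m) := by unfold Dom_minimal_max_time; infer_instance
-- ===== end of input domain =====

-- B replaces A's index-driven early-return feasibility loop by a total day-counting fold
-- over the sliced chapter prefix and A's while-loop bisection by a recursive solve; same
-- cost, different decomposition ("alternative").


-- ===== PORT A =====
-- is_possible's 'for i in range(m)' loop with its early 'return False'; chapters[i] is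
-- ported with pyGetD: its IndexError case (m > len(chapters)) is excluded by Pre_, so the
-- default 0 is never read inside the claim.
def ipLoop (chapters : List Int) (n maxTime : Int) : List Int → Int → Int → Bool
  | [], _, _ => true
  | i :: rest, days, timeRequired =>
    let c := PySem.List.pyGetD chapters i 0
    if timeRequired + c ≤ maxTime then
      ipLoop chapters n maxTime rest days (timeRequired + c)
    else
      if days + 1 > n then false
      else ipLoop chapters n maxTime rest (days + 1) c

def is_possible (chapters : List Int) (n m maxTime : Int) : Bool :=
  ipLoop chapters n maxTime (PySem.List.pyRange 0 m 1) 1 0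

-- the 'while left < right' bisection loop
def bisectLoop (chapters : List Int) (n m : Int) (left right : Int) : Int :=
  if h : left < right then
    let mid := PySem.Int.floordiv (left + right) 2
    if is_possible chapters n m mid then bisectLoop chapters n m left mid
    else bisectLoop chapters n m (mid + 1) right
  else left
termination_by (right - left).toNat
decreasing_by
  · have h2 : PySem.Int.floordiv (left + right) 2 < right :=
      (PySem.Int.floordiv_lt_iff_lt_mul (by omega)).2 (by omega)
    omega
  · have h1 : left ≤ PySem.Int.floordiv (left + right) 2 :=
      (PySem.Int.floordiv_two_mid_bounds (le_of_lt h)).1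
    omega

-- max(chapters) raises ValueError on []: excluded by Pre_, the default 0 is never read.
def minimal_max_time (chapters : List Int) (n : Int) (m : Int) : Int :=
  bisectLoop chapters n m ((PySem.List.max? chapters (fun x => x)).getD 0) chapters.sum

-- ===== PORT B =====
-- 'def days(t)': one total fold over the work list carrying (d, run)
def daysCount (work : List Int) (t : Int) : Int :=
  (work.foldl
    (fun (s : Int × Int) c =>
      let run := s.2 + c
      if run > t then (s.1 + 1, c) else (s.1, run))
    (1, 0)).1

-- 'def solve(lo, hi)': recursive bisection
def solveRec (work : List Int) (n : Int) (lo hi : Int) : Int :=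
  if h : lo ≥ hi then lo
  else
    let mid := PySem.Int.floordiv (lo + hi) 2
    if daysCount work mid ≤ n then solveRec work n lo mid
    else solveRec work n (mid + 1) hi
termination_by (hi - lo).toNat
decreasing_by
  · have h2 : PySem.Int.floordiv (lo + hi) 2 < hi :=
      (PySem.Int.floordiv_lt_iff_lt_mul (by omega)).2 (by omega)
    omega
  · have h1 : lo ≤ PySem.Int.floordiv (lo + hi) 2 :=
      (PySem.Int.floordiv_two_mid_bounds (by omega)).1
    omega

-- work = chapters[:max(0, m)]; max(chapters) as in A ([] is outside Pre_)
def minimal_max_time_alt (chapters : List Int) (n : Int) (m : Int) : Int :=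
  solveRec (PySem.List.slice chapters none (some (max 0 m))) n
    ((PySem.List.max? chapters (fun x => x)).getD 0) chapters.sum

-- ===== PRECONDITION & SPEC =====
-- Pre_ excludes empty chapters (max([]) raises ValueError), m > len(chapters) except when
-- the search interval [max, sum] is empty and the loop never runs (the feasibility loop can
-- raise IndexError whenever it does run), and — for a nonpositive day budget n ≤ 0, outside
-- the task's natural domain — the proper prefixes m < len(chapters), where A's early-exit
-- check never fires when the whole prefix fits into one day.
def Pre_minimal_max_time (chapters : List Int) (n : Int) (m : Int) : Prop :=
  chapters ≠ [] ∧
    (chapters.sum ≤ (PySem.List.max? chapters (fun x => x)).getD 0 ∨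
      (m ≤ (chapters.length : Int) ∧ 1 ≤ n) ∨
      (m = (chapters.length : Int) ∧ n ≤ 0))
instance (chapters : List Int) (n : Int) (m : Int) : Decidable (Pre_minimal_max_time chapters n m) := by
  unfold Pre_minimal_max_time; infer_instance

def pvWitness_minimal_max_time : List Int × Int × Int := ([3, 4], 2, 2)

def Spec_minimal_max_time (chapters : List Int) (n : Int) (m : Int) (out : Int) : Prop := out = minimal_max_time_alt chapters n m
instance (chapters : List Int) (n : Int) (m : Int) (out : Int) : Decidable (Spec_minimal_max_time chapters n m out) := by unfold Spec_minimal_max_time; infer_instance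

-- ===== CLAIM (what is proved, stated in full; the proofs are below) =====
def Claim_equal_minimal_max_time : Prop := ∀ (chapters : List Int) (n : Int) (m : Int), Dom_minimal_max_time chapters n m → Pre_minimal_max_time chapters n m → Spec_minimal_max_time chapters n m (minimal_max_time chapters n m)

-- ===== LEMMAS AND PROOFS =====

-- A's loop reads only the values chapters[i] for i in the index list
def goVals (n maxTime : Int) : List Int → Int → Int → Bool
  | [], _, _ => true
  | c :: cs, days, timeRequired =>
    if timeRequired + c ≤ maxTime then goVals n maxTime cs days (timeRequired + c)
    else
      if days + 1 > n then false
      else goVals n maxTime cs (days + 1) c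

lemma ipLoop_eq_goVals (chapters : List Int) (n t : Int) :
    ∀ (is' : List Int) (d tr : Int),
      ipLoop chapters n t is' d tr
        = goVals n t (is'.map (fun i => PySem.List.pyGetD chapters i 0)) d tr := by
  intro is'
  induction is' with
  | nil => intro d tr; rfl
  | cons i rest ih =>
    intro d tr
    simp only [ipLoop, goVals, List.map_cons]
    split_ifs <;> simp [ih]

lemma map_pyGetD_range_take (xs : List Int) :
    ∀ (k : Nat), k ≤ xs.length →
      (PySem.List.pyRange 0 (k : Int) 1).map (fun i => PySem.List.pyGetD xs i 0)
        = xs.take k := by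
  intro k
  induction k with
  | zero => intro _; simp [PySem.List.pyRange_one_eq_nil]
  | succ k ih =>
    intro hk
    have hk' : k < xs.length := by omega
    have hcast : ((k + 1 : Nat) : Int) = (k : Int) + 1 := by push_cast; ring
    rw [hcast, PySem.List.pyRange_one_succ_right (by positivity), List.map_append,
      ih (by omega)]
    simp only [List.map_cons, List.map_nil, PySem.List.pyGetD_natCast]
    rw [List.take_add_one]
    congr 1
    simp [List.getD, List.getElem?_eq_getElem hk']

lemma foldl_days_le (t : Int) :
    ∀ (cs : List Int) (d tr : Int),
      d ≤ (cs.foldl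
            (fun (s : Int × Int) c =>
              let run := s.2 + c
              if run > t then (s.1 + 1, c) else (s.1, run)) (d, tr)).1 := by
  intro cs
  induction cs with
  | nil => intro d tr; simp
  | cons c cs ih =>
    intro d tr
    simp only [List.foldl_cons]
    by_cases h : tr + c > t
    · simp only [h, if_pos]
      exact le_trans (by omega) (ih (d + 1) c)
    · simp only [h, if_neg, not_false_iff]
      exact ih d (tr + c)

lemma goVals_eq_foldl (n t : Int) :
    ∀ (cs : List Int) (d tr : Int), d ≤ n →
      goVals n t cs d tr
        = decide ((cs.foldl
            (fun (s : Int × Int) c =>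
              let run := s.2 + c
              if run > t then (s.1 + 1, c) else (s.1, run)) (d, tr)).1 ≤ n) := by
  intro cs
  induction cs with
  | nil => intro d tr hd; simp [goVals, hd]
  | cons c cs ih =>
    intro d tr hd
    simp only [goVals, List.foldl_cons]
    by_cases h1 : tr + c ≤ t
    · rw [if_pos h1]
      have : ¬ (tr + c > t) := by omega
      simp only [this, if_neg, not_false_iff]
      exact ih d (tr + c) hd
    · rw [if_neg h1]
      have hgt : tr + c > t := by omega
      simp only [hgt, if_pos]
      by_cases h2 : d + 1 > n
      · rw [if_pos h2]
        have hle := foldl_days_le t cs (d + 1) c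
        have : ¬ ((cs.foldl
            (fun (s : Int × Int) c =>
              let run := s.2 + c
              if run > t then (s.1 + 1, c) else (s.1, run)) (d + 1, c)).1 ≤ n) := by omega
        simp [this]
      · rw [if_neg h2]
        exact ih (d + 1) c (by omega)

-- the two feasibility tests agree pointwise inside Pre_
lemma pred_eq (chapters : List Int) (n m : Int)
    (hm : m ≤ (chapters.length : Int)) (hn : 1 ≤ n) (t : Int) :
    is_possible chapters n m t
      = decide (daysCount (PySem.List.slice chapters none (some (max 0 m))) t ≤ n) := by
  unfold is_possible daysCount
  by_cases h0 : 0 ≤ m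
  · obtain ⟨k, hk⟩ : ∃ k : Nat, m = (k : Int) := ⟨m.toNat, by omega⟩
    subst hk
    have hmax : max 0 (k : Int) = (k : Int) := max_eq_right (by positivity)
    rw [ipLoop_eq_goVals, hmax, PySem.List.slice_to_natCast,
      map_pyGetD_range_take chapters k (by exact_mod_cast hm)]
    exact goVals_eq_foldl n t (chapters.take k) 1 0 hn
  · have hmax : max 0 m = 0 := by omega
    rw [ipLoop_eq_goVals, PySem.List.pyRange_one_eq_nil (by omega), hmax,
      PySem.List.slice_to chapters (le_refl 0)]
    simp [goVals, hn]

-- with n ≤ 0 every cut returns False immediately, and some cut must happen whenever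
-- t < the total sum (the uncut running sum would end at the total)
lemma goVals_false (n t : Int) (hn : n ≤ 0) :
    ∀ (cs : List Int) (d tr : Int), 0 ≤ d → t < tr + cs.sum → (tr ≤ t ∨ cs ≠ []) →
      goVals n t cs d tr = false := by
  intro cs
  induction cs with
  | nil =>
    intro d tr _ ht hor
    rcases hor with h | h
    · simp at ht; omega
    · exact absurd rfl h
  | cons c cs ih =>
    intro d tr hd ht _
    simp only [goVals]
    by_cases h1 : tr + c ≤ t
    · rw [if_pos h1]
      refine ih d (tr + c) hd ?_ (Or.inl h1)
      simp at ht ⊢; omega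
    · rw [if_neg h1, if_pos (by omega)]

-- for n ≤ 0 and m = len(chapters) both tests are False below the total sum
lemma pred_eq_nonpos (chapters : List Int) (n : Int)
    (hne : chapters ≠ []) (hn : n ≤ 0) (t : Int) (ht : t < chapters.sum) :
    is_possible chapters n (chapters.length : Int) t
      = decide (daysCount
          (PySem.List.slice chapters none (some (max 0 (chapters.length : Int)))) t ≤ n) := by
  unfold is_possible
  rw [ipLoop_eq_goVals, map_pyGetD_range_take chapters chapters.length (le_refl _),
    List.take_length, goVals_false n t hn chapters 1 0 (by omega) (by omega) (Or.inr hne)]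
  have h1 := foldl_days_le t
    (PySem.List.slice chapters none (some (max 0 (chapters.length : Int)))) 1 0
  unfold daysCount
  have : ¬ ((List.foldl
      (fun (s : Int × Int) c =>
        let run := s.2 + c
        if run > t then (s.1 + 1, c) else (s.1, run)) (1, 0)
      (PySem.List.slice chapters none (some (max 0 (chapters.length : Int))))).1 ≤ n) := by
    have := h1; omega
  exact (decide_eq_false this).symm

-- the two searches agree once the tests agree below the initial right bound
lemma bisect_eq_solve (chapters work : List Int) (n m R : Int)
    (hpred : ∀ t, t < R → is_possible chapters n m t = decide (daysCount work t ≤ n)) :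
    ∀ (K : Nat) (l r : Int), (r - l).toNat ≤ K → r ≤ R →
      bisectLoop chapters n m l r = solveRec work n l r := by
  intro K
  induction K with
  | zero =>
    intro l r hK _
    have hlr : ¬ l < r := by omega
    rw [bisectLoop, solveRec]
    simp [hlr, le_of_not_gt hlr]
  | succ K ih =>
    intro l r hK hR
    rw [bisectLoop, solveRec]
    by_cases hlr : l < r
    · have hge : ¬ l ≥ r := by omega
      simp only [hlr, dif_pos, hge, dif_neg, not_false_iff]
      have h1 : l ≤ PySem.Int.floordiv (l + r) 2 :=
        (PySem.Int.floordiv_two_mid_bounds (by omega)).1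
      have h2 : PySem.Int.floordiv (l + r) 2 < r :=
        (PySem.Int.floordiv_lt_iff_lt_mul (by omega)).2 (by omega)
      rw [hpred _ (by omega)]
      by_cases hp : daysCount work (PySem.Int.floordiv (l + r) 2) ≤ n
      · simp only [hp, decide_true, if_pos]
        exact ih l (PySem.Int.floordiv (l + r) 2) (by omega) (by omega)
      · simp only [hp, decide_false, if_neg, Bool.false_eq_true,
          not_false_iff]
        exact ih (PySem.Int.floordiv (l + r) 2 + 1) r (by omega) hR
    · have hge : l ≥ r := by omega
      simp [hlr, hge]

-- ===== VERDICT (by name: the statement is the Claim_ definition above) =====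
theorem minimal_max_time_spec : Claim_equal_minimal_max_time := by
  intro chapters n m _ hpre
  obtain ⟨hne, hcase⟩ := hpre
  unfold Spec_minimal_max_time minimal_max_time minimal_max_time_alt
  rcases hcase with hs | ⟨hm, hn⟩ | ⟨hm, hn⟩
  · rw [bisectLoop, solveRec]
    simp [not_lt.2 hs, hs]
  · exact bisect_eq_solve chapters _ n m chapters.sum
      (fun t _ => pred_eq chapters n m hm hn t) _ _ _ (le_refl _) (le_refl _)
  · subst hm
    exact bisect_eq_solve chapters _ n _ chapters.sum
      (pred_eq_nonpos chapters n hne hn) _ _ _ (le_refl _) (le_refl _)
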